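-- pv_equiv track=rewrite | github.com/RaulggSouza/APR1 | APR1/funcoes/Ex_05.py | isReal
-- ===== SOURCE A (Python) =====
-- def isReal(n):
--     contador = 0
--     numeros = ['0','1','2','3','4','5','6','7','8','9','-','.']
--     for i in range(len(n)):
--         for j in range(len(numeros)):
--             if n[i] == numeros[j]:
--                 contador += 1
--     if contador == len(n):
--         return True
--     else:
--         return False
-- ===== SOURCE B (Python) =====
-- def isReal(n):
--     if n == '':
--         return True
--     c = n[0]
--     if ('0' <= c <= '9') or c == '-' or c == '.':
--         return isReal(n[1:])
--     return False
-- ===== Notes on version B (the rewrite author's own statement) =====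
-- stated objective: alternative
-- what changed: Replaces A's nested counting loops (count matches against an allowed-character list, then compare the count to the string length) with a short-circuiting structural recursion on the string that tests each character by an ordinal digit-range comparison plus two equality tests and returns False at the first bad character.
import Mathlib
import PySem

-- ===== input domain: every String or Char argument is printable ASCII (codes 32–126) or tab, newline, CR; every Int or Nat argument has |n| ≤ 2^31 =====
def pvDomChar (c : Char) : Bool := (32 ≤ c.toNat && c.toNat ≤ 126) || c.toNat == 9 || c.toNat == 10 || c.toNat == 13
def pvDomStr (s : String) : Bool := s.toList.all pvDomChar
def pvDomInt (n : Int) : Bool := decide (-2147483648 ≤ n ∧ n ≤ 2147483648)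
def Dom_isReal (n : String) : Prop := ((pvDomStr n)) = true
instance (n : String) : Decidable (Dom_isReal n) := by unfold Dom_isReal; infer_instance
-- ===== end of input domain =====

-- B replaces A's nested counting loops by a short-circuiting recursion with an ordinal digit-range test (alternative).

-- ===== PORT A =====
def isReal (n : String) : Bool :=
  let numeros : List Char := ['0','1','2','3','4','5','6','7','8','9','-','.']
  let contador : Int :=
    (PySem.List.pyRange 0 (n.toList.length : Int) 1).foldl
      (fun c i =>
        (PySem.List.pyRange 0 (numeros.length : Int) 1).foldl
          (fun c j =>
            if PySem.List.pyGetD n.toList i ' ' == PySem.List.pyGetD numeros j ' '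
            then c + 1 else c) c) 0
  if contador = (n.toList.length : Int) then true else false

-- ===== PORT B =====
-- recursion on the string's character list = Source B's recursion on n[1:]
def isRealGo : List Char → Bool
  | [] => true
  | c :: rest =>
      if (('0' ≤ c && c ≤ '9') || c == '-' || c == '.') then isRealGo rest
      else false

def isReal_alt (n : String) : Bool := isRealGo n.toList

-- ===== PRECONDITION & SPEC =====
def Spec_isReal (n : String) (out : Bool) : Prop := out = isReal_alt n
instance (n : String) (out : Bool) : Decidable (Spec_isReal n out) := by unfold Spec_isReal; infer_instance

-- ===== CLAIM (what is proved, stated in full; the proofs are below) =====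
def Claim_equal_isReal : Prop := ∀ (n : String), Dom_isReal n → Spec_isReal n (isReal n)

-- ===== LEMMAS AND PROOFS =====

def pvNumeros : List Char := ['0','1','2','3','4','5','6','7','8','9','-','.']

-- a counting foldl is the list's count
theorem pv_cnt (ch : Char) (l : List Char) (c : Int) :
    l.foldl (fun c m => if ch == m then c + 1 else c) c = c + (l.count ch : Int) := by
  induction l generalizing c with
  | nil => simp
  | cons x xs ih =>
      simp only [List.foldl_cons, List.count_cons, ih]
      by_cases h : ch = x
      · simp [h]
        ring
      · simp [h]
        exact fun hx => h hx.symm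

-- inner loop of A: counts how many entries of numeros equal ch (each distinct, so 0 or 1)
theorem pv_inner (ch : Char) (c : Int) :
    List.foldl (fun c m => if ch == m then c + 1 else c) c
        ['0','1','2','3','4','5','6','7','8','9','-','.']
      = c + (if ch ∈ pvNumeros then 1 else 0) := by
  rw [pv_cnt]
  by_cases h : ch ∈ pvNumeros
  · rw [List.count_eq_one_of_mem (by decide) (by simpa [pvNumeros] using h)]; simp [h]
  · rw [List.count_eq_zero.mpr (by simpa [pvNumeros] using h)]; simp [h]

-- outer loop of A counts the characters of l that lie in pvNumeros
theorem pv_outer (l : List Char) (c : Int) :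
    l.foldl (fun c ch => c + (if ch ∈ pvNumeros then 1 else 0)) c
      = c + l.countP (fun ch => decide (ch ∈ pvNumeros)) := by
  induction l generalizing c with
  | nil => simp
  | cons x xs ih =>
      simp only [List.foldl_cons, List.countP_cons, ih]
      split_ifs <;> simp_all
      omega

theorem pv_count_eq_len (l : List Char) :
    (l.countP (fun ch => decide (ch ∈ pvNumeros)) : Int) = (l.length : Int)
      ↔ ∀ ch ∈ l, ch ∈ pvNumeros := by
  rw [Int.natCast_inj]
  constructor
  · intro h ch hch
    have := List.countP_eq_length.mp h ch hch
    simpa using this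
  · intro h
    exact List.countP_eq_length.mpr (fun ch hch => by simpa using h ch hch)

-- digit range implies membership (ordinal test → list membership)
theorem pv_digit_mem (c : Char) (h1 : ('0':Char) ≤ c) (h2 : c ≤ '9') : c ∈ pvNumeros := by
  have l1 : 48 ≤ c.toNat := by
    rw [Char.le_def, UInt32.le_iff_toNat_le] at h1; simpa using h1
  have l2 : c.toNat ≤ 57 := by
    rw [Char.le_def, UInt32.le_iff_toNat_le] at h2; simpa using h2
  interval_cases hn : c.toNat <;>
    · have hc : c = Char.ofNat c.toNat := (Char.ofNat_toNat c).symm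
      rw [hn] at hc
      subst hc; decide

-- B's per-character test agrees with membership in pvNumeros
theorem pv_char_test (c : Char) :
    (('0' ≤ c && c ≤ '9') || c == '-' || c == '.') = decide (c ∈ pvNumeros) := by
  rw [Bool.eq_iff_iff]
  simp only [Bool.or_eq_true, Bool.and_eq_true, decide_eq_true_eq, beq_iff_eq]
  constructor
  · rintro ((⟨h1, h2⟩ | rfl) | rfl)
    · exact pv_digit_mem c h1 h2
    · decide
    · decide
  · intro h
    fin_cases h <;> decide

theorem pv_go_iff (l : List Char) : isRealGo l = true ↔ ∀ ch ∈ l, ch ∈ pvNumeros := by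
  induction l with
  | nil => simp [isRealGo]
  | cons x xs ih =>
      simp only [isRealGo, pv_char_test]
      by_cases h : x ∈ pvNumeros <;> simp [h, ih]

-- ===== VERDICT (by name: the statement is the Claim_ definition above) =====
theorem isReal_spec : Claim_equal_isReal := by
  intro n _
  unfold Spec_isReal isReal isReal_alt
  dsimp only
  rw [PySem.List.foldl_pyRange_zero_pyGetD' n.toList ' '
    (fun c ch => (PySem.List.pyRange 0 (((['0','1','2','3','4','5','6','7','8','9','-','.']):List Char).length : Int) 1).foldl
      (fun c j => if ch == PySem.List.pyGetD ['0','1','2','3','4','5','6','7','8','9','-','.'] j ' '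
                  then c + 1 else c) c) 0]
  have hloop : ∀ (c : Int) (ch : Char),
      (PySem.List.pyRange 0 (((['0','1','2','3','4','5','6','7','8','9','-','.']):List Char).length : Int) 1).foldl
        (fun c j => if ch == PySem.List.pyGetD ['0','1','2','3','4','5','6','7','8','9','-','.'] j ' '
                    then c + 1 else c) c
        = c + (if ch ∈ pvNumeros then 1 else 0) := by
    intro c ch
    rw [PySem.List.foldl_pyRange_zero_pyGetD' (['0','1','2','3','4','5','6','7','8','9','-','.'] : List Char) ' '
      (fun c m => if ch == m then c + 1 else c) c]
    exact pv_inner ch c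
  simp only [hloop, pv_outer, zero_add]
  by_cases h : ∀ ch ∈ n.toList, ch ∈ pvNumeros
  · rw [if_pos ((pv_count_eq_len n.toList).mpr h)]
    exact ((pv_go_iff n.toList).mpr h).symm
  · rw [if_neg (fun hc => h ((pv_count_eq_len n.toList).mp hc))]
    exact (Bool.eq_false_iff.mpr (fun hc => h ((pv_go_iff n.toList).mp hc))).symm
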